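-- pv_equiv track=rewrite | github.com/SvenKardol/AdventOfCode2023 | day10/part2.py | remove_junk
-- ===== SOURCE A (Python) =====
-- def remove_junk(data, position_dict):
--     clear_data = []
--     for y in range(len(data)):
--         new_line = ""
--         for x in range(len(data[y])):
--             if (x, y) in position_dict:
--                 new_line += data[y][x]
--             else:
--                 new_line += "."
--         clear_data.append(new_line)
--
--     return clear_data
-- ===== SOURCE B (Python) =====
-- def remove_junk(data, position_dict):
--     canvas = [["."] * len(line) for line in data]
--     for (px, py) in position_dict:
--         if 0 <= py < len(data) and 0 <= px < len(data[py]):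
--             canvas[py][px] = data[py][px]
--     return ["".join(row) for row in canvas]
-- ===== Notes on version B (the rewrite author's own statement) =====
-- stated objective: faster
-- what changed: A builds each row character by character, doing a dict-membership test and a string concatenation per grid cell; B builds a '.'-filled canvas of char lists and sparsely overwrites it in one bounds-checked pass over the dict's keys, then joins each row.
import Mathlib
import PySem

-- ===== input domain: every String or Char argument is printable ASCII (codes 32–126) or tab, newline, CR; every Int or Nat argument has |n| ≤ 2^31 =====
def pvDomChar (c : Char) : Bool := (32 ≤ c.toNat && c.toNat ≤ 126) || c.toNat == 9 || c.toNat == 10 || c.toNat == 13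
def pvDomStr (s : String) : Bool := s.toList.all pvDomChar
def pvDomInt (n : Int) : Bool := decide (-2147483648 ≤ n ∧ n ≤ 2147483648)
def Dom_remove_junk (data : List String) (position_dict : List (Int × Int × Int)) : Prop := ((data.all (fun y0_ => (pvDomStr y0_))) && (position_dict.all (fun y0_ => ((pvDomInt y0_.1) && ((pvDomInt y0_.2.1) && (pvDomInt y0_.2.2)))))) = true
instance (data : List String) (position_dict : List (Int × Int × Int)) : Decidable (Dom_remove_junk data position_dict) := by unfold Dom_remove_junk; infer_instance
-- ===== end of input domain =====

-- B replaces A's per-cell dict lookup and string concatenation by a '.'-filled canvas that is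
-- sparsely overwritten in one bounds-checked pass over the dict's keys (measured faster).

-- ===== PORT A =====
-- A: for y in range(len(data)): build new_line char by char, testing (x, y) ∈ position_dict keys.
def remove_junk (data : List String) (position_dict : List (Int × Int × Int)) : List String :=
  (PySem.List.pyRange 0 data.length 1).foldl (fun clear_data y =>
    let line := PySem.List.pyGetD data y ""
    let new_line := (PySem.List.pyRange 0 (PySem.Str.len line) 1).foldl (fun nl x =>
      if position_dict.any (fun p => p.1 == x && p.2.1 == y)
      then nl ++ [(PySem.Str.pyGet? line x).getD '.']   -- data[y][x]; index always in range here
      else nl ++ ['.']) ([] : List Char)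
    clear_data ++ [String.ofList new_line]) []

-- ===== PORT B =====
-- B: build a canvas of '.'-rows, then one pass over the dict's keys writes data[py][px]
-- at each in-bounds (px, py); finally join each row.
def remove_junk_alt (data : List String) (position_dict : List (Int × Int × Int)) : List String :=
  (position_dict.foldl (fun cv p =>
    if (0 ≤ p.2.1 && p.2.1 < (data.length : Int)) &&
       (0 ≤ p.1 && p.1 < ((PySem.List.pyGetD data p.2.1 "").toList.length : Int))
    then cv.set p.2.1.toNat
           ((cv.getD p.2.1.toNat []).set p.1.toNat
             ((PySem.List.pyGetD data p.2.1 "").toList.getD p.1.toNat '.'))  -- canvas[py][px] = data[py][px]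
    else cv)
    (data.map (fun line => List.replicate line.toList.length '.'))).map String.ofList

-- ===== PRECONDITION & SPEC =====
def Spec_remove_junk (data : List String) (position_dict : List (Int × Int × Int)) (out : List String) : Prop := out = remove_junk_alt data position_dict
instance (data : List String) (position_dict : List (Int × Int × Int)) (out : List String) : Decidable (Spec_remove_junk data position_dict out) := by unfold Spec_remove_junk; infer_instance

-- ===== CLAIM (what is proved, stated in full; the proofs are below) =====
def Claim_equal_remove_junk : Prop := ∀ (data : List String) (position_dict : List (Int × Int × Int)), Dom_remove_junk data position_dict → Spec_remove_junk data position_dict (remove_junk data position_dict)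

-- ===== LEMMAS AND PROOFS =====

-- B's fill loop, pointwise: cell k (k < |cs|) holds cs[k] iff some key of ps is (k, y).
theorem fill_length (cs : List Char) (y : Int) (ps : List (Int × Int × Int)) (row : List Char) :
    (ps.foldl (fun row p =>
      if p.2.1 == y && (0 ≤ p.1 && p.1 < (cs.length : Int))
      then row.set p.1.toNat (cs.getD p.1.toNat '.') else row) row).length = row.length := by
  induction ps generalizing row with
  | nil => rfl
  | cons p ps ih =>
      simp only [List.foldl_cons]
      rw [ih]
      split <;> simp

theorem fill_get (cs : List Char) (y : Int) (ps : List (Int × Int × Int)) (row : List Char)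
    (hrow : row.length = cs.length) (k : Nat) (hk : k < cs.length) :
    (ps.foldl (fun row p =>
      if p.2.1 == y && (0 ≤ p.1 && p.1 < (cs.length : Int))
      then row.set p.1.toNat (cs.getD p.1.toNat '.') else row) row)[k]? =
    if ps.any (fun p => p.1 == (k : Int) && p.2.1 == y) then cs[k]? else row[k]? := by
  induction ps generalizing row with
  | nil => simp
  | cons p ps ih =>
      simp only [List.foldl_cons, List.any_cons]
      by_cases hp : p.1 = (k : Int) ∧ p.2.1 = y
      · have hguard : (p.2.1 == y && (0 ≤ p.1 && p.1 < (cs.length : Int))) = true := by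
          simp [hp.1, hp.2]; omega
        rw [hguard, if_pos rfl]
        have htn : p.1.toNat = k := by omega
        rw [ih _ (by simp [hrow])]
        have hset : (row.set p.1.toNat (cs.getD p.1.toNat '.'))[k]? = cs[k]? := by
          rw [htn, List.getElem?_set_self (by omega)]
          simp [List.getD, List.getElem?_eq_getElem hk]
        rw [hset]
        have hpt : (p.1 == (k : Int) && p.2.1 == y) = true := by simp [hp.1, hp.2]
        simp [hpt]
      · have hne : (p.1 == (k : Int) && p.2.1 == y) = false := by
          rcases not_and_or.mp hp with h | h <;> simp [h]
        simp only [hne, Bool.false_or]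
        split
        · rename_i hguard
          rw [ih _ (by simp [hrow])]
          have hset : (row.set p.1.toNat (cs.getD p.1.toNat '.'))[k]? = row[k]? := by
            apply List.getElem?_set_ne
            simp only [Bool.and_eq_true, beq_iff_eq, decide_eq_true_eq] at hguard
            intro hEq
            exact hp ⟨by omega, hguard.1⟩
          rw [hset]
        · exact ih _ hrow

-- One row: A's char-by-char build equals B's sparse fill of a '.'-row.
theorem row_eq (line : String) (y : Int) (ps : List (Int × Int × Int)) :
    (PySem.List.pyRange 0 (PySem.Str.len line) 1).foldl (fun nl x =>
      if ps.any (fun p => p.1 == x && p.2.1 == y)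
      then nl ++ [(PySem.Str.pyGet? line x).getD '.']
      else nl ++ ['.']) ([] : List Char) =
    ps.foldl (fun row p =>
      if p.2.1 == y && (0 ≤ p.1 && p.1 < (line.toList.length : Int))
      then row.set p.1.toNat (line.toList.getD p.1.toNat '.') else row)
      (List.replicate line.toList.length '.') := by
  have hA : ∀ (l : List Int) (init : List Char),
      l.foldl (fun nl x =>
        if ps.any (fun p => p.1 == x && p.2.1 == y)
        then nl ++ [(PySem.Str.pyGet? line x).getD '.']
        else nl ++ ['.']) init =
      init ++ l.map (fun x => if ps.any (fun p => p.1 == x && p.2.1 == y)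
        then (PySem.Str.pyGet? line x).getD '.' else '.') := by
    intro l
    induction l with
    | nil => simp
    | cons a l ih =>
        intro init
        simp only [List.foldl_cons, List.map_cons]
        split <;> rw [ih] <;> simp
  rw [hA, List.nil_append, PySem.Str.len_eq, PySem.List.pyRange_zero_natCast]
  apply List.ext_getElem?
  intro k
  by_cases hk : k < line.toList.length
  · rw [fill_get _ _ _ _ (by simp) k hk]
    rw [List.getElem?_map, List.getElem?_map, List.getElem?_range hk]
    simp only [Option.map_some]
    split
    · simp [List.getElem?_eq_getElem hk]
    · rw [List.getElem?_replicate, if_pos hk]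
  · rw [List.getElem?_eq_none, List.getElem?_eq_none]
    · rw [fill_length]; simpa using hk
    · simpa using hk

-- The canvas fold keeps its length.
theorem canvas_length (data : List String) (ps : List (Int × Int × Int)) (cv : List (List Char)) :
    (ps.foldl (fun cv p =>
      if (0 ≤ p.2.1 && p.2.1 < (data.length : Int)) &&
         (0 ≤ p.1 && p.1 < ((PySem.List.pyGetD data p.2.1 "").toList.length : Int))
      then cv.set p.2.1.toNat
             ((cv.getD p.2.1.toNat []).set p.1.toNat
               ((PySem.List.pyGetD data p.2.1 "").toList.getD p.1.toNat '.'))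
      else cv) cv).length = cv.length := by
  induction ps generalizing cv with
  | nil => rfl
  | cons p ps ih =>
      simp only [List.foldl_cons]
      rw [ih]
      split <;> simp

-- Row j of B's canvas fold is exactly the single-row fill of row_eq.
theorem canvas_row (data : List String) (ps : List (Int × Int × Int)) (j : Nat)
    (hj : j < data.length) (line : String) (hline : PySem.List.pyGetD data (j : Int) "" = line)
    (cv : List (List Char)) (r : List Char) (hlen : cv.length = data.length)
    (hr : cv[j]? = some r) :
    (ps.foldl (fun cv p =>
      if (0 ≤ p.2.1 && p.2.1 < (data.length : Int)) &&
         (0 ≤ p.1 && p.1 < ((PySem.List.pyGetD data p.2.1 "").toList.length : Int))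
      then cv.set p.2.1.toNat
             ((cv.getD p.2.1.toNat []).set p.1.toNat
               ((PySem.List.pyGetD data p.2.1 "").toList.getD p.1.toNat '.'))
      else cv) cv)[j]? =
    some (ps.foldl (fun row p =>
      if p.2.1 == (j : Int) && (0 ≤ p.1 && p.1 < (line.toList.length : Int))
      then row.set p.1.toNat (line.toList.getD p.1.toNat '.') else row) r) := by
  induction ps generalizing cv r with
  | nil => simpa using hr
  | cons p ps ih =>
      simp only [List.foldl_cons]
      by_cases hg1 : (p.2.1 == (j : Int) && (0 ≤ p.1 && p.1 < (line.toList.length : Int))) = true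
      · have h1 := hg1
        simp only [Bool.and_eq_true, beq_iff_eq, decide_eq_true_eq] at h1
        obtain ⟨hpy, hx0, hx1⟩ := h1
        have htn : p.2.1.toNat = j := by omega
        have hg2 : ((0 ≤ p.2.1 && p.2.1 < (data.length : Int)) &&
            (0 ≤ p.1 && p.1 < ((PySem.List.pyGetD data p.2.1 "").toList.length : Int))) = true := by
          rw [hpy, hline]
          simp only [Bool.and_eq_true, decide_eq_true_eq]
          refine ⟨⟨by omega, by omega⟩, by omega, by omega⟩
        rw [if_pos hg2, if_pos hg1]
        have hR : (cv.getD j []).set p.1.toNat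
            ((PySem.List.pyGetD data p.2.1 "").toList.getD p.1.toNat '.') =
            r.set p.1.toNat (line.toList.getD p.1.toNat '.') := by
          rw [hpy, hline, List.getD_eq_getElem?_getD, hr]
          rfl
        exact ih _ _ (by simp [hlen])
          (by rw [htn, List.getElem?_set_self (by omega), hR])
      · rw [if_neg hg1]
        by_cases hg2 : ((0 ≤ p.2.1 && p.2.1 < (data.length : Int)) &&
            (0 ≤ p.1 && p.1 < ((PySem.List.pyGetD data p.2.1 "").toList.length : Int))) = true
        · have h2 := hg2
          simp only [Bool.and_eq_true, decide_eq_true_eq] at h2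
          obtain ⟨⟨hy0, hy1⟩, hx0, hx1⟩ := h2
          have hpy : p.2.1 ≠ (j : Int) := by
            intro heq
            rw [heq, hline] at hx1
            refine hg1 ?_
            simp only [heq, beq_self_eq_true, Bool.true_and, Bool.and_eq_true,
                       decide_eq_true_eq]
            exact ⟨hx0, by simpa using hx1⟩
          have htnne : p.2.1.toNat ≠ j := by omega
          rw [if_pos hg2]
          exact ih _ r (by simp [hlen]) ((List.getElem?_set_ne htnne).trans hr)
        · rw [if_neg hg2]
          exact ih cv r hlen hr

-- A's outer loop is a map over the row indices; B's canvas yields the same rows.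
theorem outer_eq (data : List String) (ps : List (Int × Int × Int)) :
    remove_junk data ps = remove_junk_alt data ps := by
  unfold remove_junk remove_junk_alt
  rw [PySem.List.foldl_append_singleton_eq_map, List.nil_append,
      PySem.List.pyRange_zero_natCast, List.map_map]
  apply List.ext_getElem?
  intro j
  by_cases hj : j < data.length
  · rw [List.getElem?_map, List.getElem?_range hj, List.getElem?_map,
        canvas_row data ps j hj (PySem.List.pyGetD data (j : Int) "") rfl _
          (List.replicate (PySem.List.pyGetD data (j : Int) "").toList.length '.')
          (by simp)
          (by rw [List.getElem?_map, List.getElem?_eq_getElem hj]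
              simp [PySem.List.pyGetD_natCast, List.getD_eq_getElem?_getD,
                    List.getElem?_eq_getElem hj])]
    simp only [Option.map_some]
    exact congrArg (fun l => some (String.ofList l))
      (row_eq (PySem.List.pyGetD data (j : Int) "") (j : Int) ps)
  · rw [List.getElem?_eq_none, List.getElem?_eq_none]
    · rw [List.length_map, canvas_length, List.length_map]; omega
    · simp; omega

-- ===== VERDICT (by name: the statement is the Claim_ definition above) =====
theorem remove_junk_spec : Claim_equal_remove_junk := by
  intro data ps _
  unfold Spec_remove_junk
  exact outer_eq data ps
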